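-- pv_equiv track=rewrite | github.com/evidencebp/analysis_utils | compute_correlated_feature_groups.py | compute_features_groups
-- ===== SOURCE A (Python) =====
-- def compute_features_groups(columns_names
--                            , n_components
--                            , labels):
--     """
--         Translate groups indices into names.
--     :param columns_names:
--     :param n_components:
--     :param labels:
--     :return:
--     """
--     components = []
--     for group in range(n_components):
--         curr = [columns_names[i] for i in range(len(labels)) if labels[i] == group]
--         if len(curr) > 1:
--             components.append(curr)
--
--     return components
-- ===== SOURCE B (Python) =====
-- def compute_features_groups(columns_names, n_components, labels):
--     buckets = {}
--     for lab, name in zip(labels, columns_names):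
--         buckets.setdefault(lab, []).append(name)
--     components = []
--     for group in range(n_components):
--         curr = buckets.get(group, [])
--         if len(curr) > 1:
--             components.append(curr)
--     return components
-- ===== Notes on version B (the rewrite author's own statement) =====
-- stated objective: faster
-- what changed: Replaced the per-group rescan of labels (one full pass over labels for every group) with a single pass that buckets column names into a dict keyed by label, then emits buckets of size > 1 in group order.
import Mathlib
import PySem

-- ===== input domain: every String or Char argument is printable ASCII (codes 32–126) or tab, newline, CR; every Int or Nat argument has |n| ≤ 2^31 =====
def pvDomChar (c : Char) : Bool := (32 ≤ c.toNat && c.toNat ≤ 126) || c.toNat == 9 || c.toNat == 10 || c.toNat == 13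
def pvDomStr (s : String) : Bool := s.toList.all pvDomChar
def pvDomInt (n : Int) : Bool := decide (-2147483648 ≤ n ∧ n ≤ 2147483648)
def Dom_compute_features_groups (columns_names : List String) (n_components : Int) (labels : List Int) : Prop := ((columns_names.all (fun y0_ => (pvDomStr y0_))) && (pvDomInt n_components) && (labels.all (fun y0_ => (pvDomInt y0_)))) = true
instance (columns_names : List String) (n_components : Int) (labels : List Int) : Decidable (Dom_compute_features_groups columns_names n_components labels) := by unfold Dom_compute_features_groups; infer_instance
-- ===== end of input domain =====

-- B replaces A's per-group rescan of labels with one bucketing pass into a dict, then emits buckets in group order (faster, asymptotic).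


-- ===== PORT A =====
-- 'for group in range(n_components): curr = [columns_names[i] for i in range(len(labels)) if labels[i] == group]; …'
-- columns_names[i] may raise IndexError: ported with pyGet? (none = IndexError), those inputs are excluded by Pre_.
def compute_features_groups (columns_names : List String) (n_components : Int) (labels : List Int) : List (List String) :=
  (PySem.List.pyRange 0 n_components 1).foldl
    (fun components group =>
      let curr := (PySem.List.pyRange 0 (labels.length : Int) 1).foldl
        (fun acc i =>
          if PySem.List.pyGetD labels i 0 = group
          then acc ++ (PySem.List.pyGet? columns_names i).toList
          else acc) []
      if curr.length > 1 then components ++ [curr] else components)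
    []

-- ===== PORT B =====
-- buckets.setdefault(lab, []).append(name)  ==  buckets[lab] = buckets.get(lab, []) + [name]  ==  Dict.modify lab [] (· ++ [name])
def compute_features_groups_alt (columns_names : List String) (n_components : Int) (labels : List Int) : List (List String) :=
  let buckets : PySem.Dict Int (List String) :=
    (labels.zip columns_names).foldl (fun d p => d.modify p.1 [] (· ++ [p.2])) PySem.Dict.empty
  (PySem.List.pyRange 0 n_components 1).foldl
    (fun components group =>
      let curr := buckets.getD group []
      if curr.length > 1 then components ++ [curr] else components)
    []

-- ===== PRECONDITION & SPEC =====
-- Pre_ excludes exactly the inputs on which A raises IndexError: a label beyond the length of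
-- columns_names that matches some group in range(n_components).
def Pre_compute_features_groups (columns_names : List String) (n_components : Int) (labels : List Int) : Prop :=
  ∀ l ∈ labels.drop columns_names.length, ¬ (0 ≤ l ∧ l < n_components)
instance (columns_names : List String) (n_components : Int) (labels : List Int) : Decidable (Pre_compute_features_groups columns_names n_components labels) := by unfold Pre_compute_features_groups; infer_instance
def pvWitness_compute_features_groups : List String × Int × List Int := (["a", "b", "c"], 2, [0, 1, 0])

def Spec_compute_features_groups (columns_names : List String) (n_components : Int) (labels : List Int) (out : List (List String)) : Prop := out = compute_features_groups_alt columns_names n_components labels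
instance (columns_names : List String) (n_components : Int) (labels : List Int) (out : List (List String)) : Decidable (Spec_compute_features_groups columns_names n_components labels out) := by unfold Spec_compute_features_groups; infer_instance

-- ===== CLAIM (what is proved, stated in full; the proofs are below) =====
def Claim_equal_compute_features_groups : Prop := ∀ (columns_names : List String) (n_components : Int) (labels : List Int), Dom_compute_features_groups columns_names n_components labels → Pre_compute_features_groups columns_names n_components labels → Spec_compute_features_groups columns_names n_components labels (compute_features_groups columns_names n_components labels)
-- ===== LEMMAS AND PROOFS =====

-- A's inner comprehension over indices equals the filtered zip (which is what B's bucket for g holds).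
lemma curr_eq_filter_zip (g : Int) (labels : List Int) (columns_names : List String)
    (acc : List String) :
    (List.range labels.length).foldl
      (fun acc i =>
        if labels.getD i 0 = g
        then acc ++ (columns_names[i]?).toList
        else acc) acc
    = acc ++ ((labels.zip columns_names).filter (fun p => p.1 == g)).map (·.2) := by
  induction labels generalizing columns_names acc with
  | nil => simp
  | cons l ls ih =>
    rw [List.length_cons, List.range_succ_eq_map, List.foldl_cons, List.foldl_map]
    cases columns_names with
    | nil =>
      have := ih [] acc
      simp only [List.getElem?_nil, Option.toList_none, List.append_nil, ite_self] at *
      simp [this]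
    | cons c cs =>
      have := ih cs (if l = g then acc ++ [c] else acc)
      simp only [List.getD_cons_succ, List.getElem?_cons_succ, List.getD_cons_zero,
        List.getElem?_cons_zero, Option.toList_some, List.zip_cons_cons, List.filter_cons] at *
      rw [this]
      by_cases h : l = g <;> simp [h]

-- A's curr for group g equals B's bucket for g.
lemma currA_eq (columns_names : List String) (labels : List Int) (g : Int) :
    (PySem.List.pyRange 0 (labels.length : Int) 1).foldl
      (fun acc i => if PySem.List.pyGetD labels i 0 = g
        then acc ++ (PySem.List.pyGet? columns_names i).toList else acc) []
    = ((labels.zip columns_names).foldl (fun d p => d.modify p.1 [] (· ++ [p.2]))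
        (PySem.Dict.empty : PySem.Dict Int (List String))).getD g [] := by
  rw [PySem.List.pyRange_zero_nat, List.foldl_map, PySem.Dict.getD_foldl_modify_append]
  simp only [PySem.List.pyGetD_natCast, PySem.List.pyGet?_natCast, PySem.Dict.getD_empty,
    List.nil_append]
  exact curr_eq_filter_zip g labels columns_names []

theorem compute_features_groups_spec : Claim_equal_compute_features_groups := by
  intro columns_names n_components labels _ _
  show compute_features_groups columns_names n_components labels
      = compute_features_groups_alt columns_names n_components labels
  unfold compute_features_groups compute_features_groups_alt
  congr 1
  funext components group
  rw [currA_eq columns_names labels group]
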